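-- pv_equiv track=rewrite | github.com/jordimiyai/PythonProjects | excercice 1/exc 1.py | validar_usuario
-- ===== SOURCE A (Python) =====
-- def validar_usuario(usuario):
--     car_anterior = None
--     arroba = 0
--
--     # Revisamos que el primer y último caracter del dominio no sean "."
--     # o "@". Si alguna de las condiciones se cumple, no es correcto
--     # el dominio y devuelve False...
--     if usuario[0] == "." or usuario[-1] == ".":
--         return False
--     elif usuario[0] == "@" or usuario[-1] == "@":
--         return False
--
--     # Revisamos la cantidad de arrobas y puntos seguidos...
--     for car in usuario:
--         if car == "@":
--             arroba += 1
--
--         if car_anterior == "." and car == ".":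
--             return  False
--
--         car_anterior = car
--
--     if arroba != 1:
--         return False
--
--     #Retorna True si no se detectó ningún error.
--     return True
-- ===== SOURCE B (Python) =====
-- def validar_usuario(usuario):
--     # Same boundary guard as A (indexing raises IndexError on the empty string, like A)
--     if usuario[0] == "." or usuario[-1] == "." or usuario[0] == "@" or usuario[-1] == "@":
--         return False
--     # Split at the separator and validate the pieces: exactly one "@" means exactly
--     # two pieces, and ".." cannot straddle an "@", so it suffices to check each piece.
--     partes = usuario.split("@")
--     return len(partes) == 2 and all(".." not in p for p in partes)
-- ===== Notes on version B (the rewrite author's own statement) =====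
-- stated objective: alternative
-- what changed: A's single fused loop carrying previous-character state and an at-sign counter is replaced by splitting the string at the separator and validating the resulting pieces: exactly two pieces (one separator) and no piece containing a double dot; correctness rests on a double dot never straddling the separator.
import Mathlib
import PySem

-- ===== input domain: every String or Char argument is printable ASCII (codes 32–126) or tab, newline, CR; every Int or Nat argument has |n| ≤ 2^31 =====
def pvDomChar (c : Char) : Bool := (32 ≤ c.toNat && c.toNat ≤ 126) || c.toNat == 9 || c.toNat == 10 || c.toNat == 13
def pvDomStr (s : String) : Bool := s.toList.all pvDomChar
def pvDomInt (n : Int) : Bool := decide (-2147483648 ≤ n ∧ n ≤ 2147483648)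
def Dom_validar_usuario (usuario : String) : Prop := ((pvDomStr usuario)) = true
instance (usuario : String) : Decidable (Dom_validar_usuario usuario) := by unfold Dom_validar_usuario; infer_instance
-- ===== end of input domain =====

-- B replaces A's fused state-carrying loop by splitting the string at '@' and validating
-- the pieces (exactly two pieces, no piece containing '..'): a different decomposition.

-- ===== PORT A =====
-- A's for-loop: state = (car_anterior, arroba); early return False on two consecutive dots.
def pvLoopA : Option Char → Int → List Char → Bool
  | _, arroba, [] => arroba == 1
  | prev, arroba, car :: rest =>
    let arroba' := if car == '@' then arroba + 1 else arroba
    if prev == some '.' && car == '.' then false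
    else pvLoopA (some car) arroba' rest

def validar_usuario (usuario : String) : Bool :=
  match PySem.Str.pyGet? usuario 0, PySem.Str.pyGet? usuario (-1) with
  | some c0, some cl =>
    if c0 == '.' || cl == '.' then false
    else if c0 == '@' || cl == '@' then false
    else pvLoopA none 0 usuario.toList
  | _, _ => false   -- IndexError on the empty string: excluded by Pre_

-- ===== PORT B =====
def validar_usuario_alt (usuario : String) : Bool :=
  -- usuario[0] / usuario[-1]: none = IndexError on the empty string, excluded by Pre_
  ((PySem.Str.pyGet? usuario 0).bind fun c0 =>
    (PySem.Str.pyGet? usuario (-1)).bind fun cl =>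
      some (if c0 == '.' || cl == '.' || c0 == '@' || cl == '@' then false
            else
              -- usuario.split("@") (sep nonempty, so PySem.Chars.splitOn is exact)
              let partes := PySem.Chars.splitOn usuario.toList ("@".toList)
              (partes.length == 2) && partes.all (fun p => !(PySem.Chars.isIn ("..".toList) p)))).getD false

-- ===== PRECONDITION & SPEC =====
-- Pre_ excludes only the empty string, on which A (and B) raise IndexError at usuario[0].
def Pre_validar_usuario (usuario : String) : Prop := usuario ≠ ""
instance (usuario : String) : Decidable (Pre_validar_usuario usuario) := by unfold Pre_validar_usuario; infer_instance
def pvWitness_validar_usuario : String := "a@b"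

def Spec_validar_usuario (usuario : String) (out : Bool) : Prop := out = validar_usuario_alt usuario
instance (usuario : String) (out : Bool) : Decidable (Spec_validar_usuario usuario out) := by unfold Spec_validar_usuario; infer_instance

-- ===== CLAIM (what is proved, stated in full; the proofs are below) =====
def Claim_equal_validar_usuario : Prop := ∀ (usuario : String), Dom_validar_usuario usuario → Pre_validar_usuario usuario → Spec_validar_usuario usuario (validar_usuario usuario)

-- ===== LEMMAS AND PROOFS =====

-- Reference splitter: split a char list at '@' (cur = current piece, reversed).
def pvSplitAt : List Char → List Char → List (List Char)
  | [], cur => [cur.reverse]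
  | c :: t, cur => if c = '@' then cur.reverse :: pvSplitAt t [] else pvSplitAt t (c :: cur)

lemma pv_go_eq : ∀ (fuel : Nat) (l cur : List Char) (acc : List (List Char)),
    l.length ≤ fuel →
    PySem.Chars.splitOn.go ['@'] fuel l cur acc = acc.reverse ++ pvSplitAt l cur := by
  intro fuel
  induction fuel with
  | zero =>
    intro l cur acc h
    cases l with
    | nil => simp [PySem.Chars.splitOn.go, pvSplitAt]
    | cons c t => simp at h
  | succ n ih =>
    intro l cur acc h
    cases l with
    | nil => simp [PySem.Chars.splitOn.go, pvSplitAt]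
    | cons c t =>
      rw [PySem.Chars.splitOn.go]
      simp only [List.length_cons] at h
      by_cases hc : c = '@'
      · have hp : List.isPrefixOf ['@'] (c :: t) = true := by simp [List.isPrefixOf, hc]
        rw [if_pos hp]
        rw [show List.drop (List.length ['@']) (c :: t) = t from by simp]
        rw [ih t [] (cur.reverse :: acc) (by omega)]
        simp [pvSplitAt, hc]
      · have hp : List.isPrefixOf ['@'] (c :: t) = false := by
          simp [List.isPrefixOf]; exact fun h' => (hc h'.symm).elim
        rw [if_neg (by simp [hp])]
        rw [ih t (c :: cur) acc (by omega)]
        simp [pvSplitAt, hc]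

lemma pv_splitOn_eq (l : List Char) :
    PySem.Chars.splitOn l ['@'] = pvSplitAt l [] := by
  rw [PySem.Chars.splitOn, pv_go_eq (l.length + 1) l [] [] (by omega)]
  simp

-- number of pieces = number of '@' + 1
lemma pv_split_length : ∀ (l cur : List Char),
    (pvSplitAt l cur).length = l.count '@' + 1 := by
  intro l
  induction l with
  | nil => intro cur; simp [pvSplitAt]
  | cons c t ih =>
    intro cur
    by_cases hc : c = '@'
    · simp [pvSplitAt, hc, ih]
    · simp [pvSplitAt, hc, ih]

-- "Two consecutive dots" predicate, carrying the previous character like A's loop does.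
def pvHasCC : Option Char → List Char → Bool
  | _, [] => false
  | prev, c :: t => (prev == some '.' && c == '.') || pvHasCC (some c) t

lemma pv_hcc_irrel (t : List Char) (a : Char) (ha : a ≠ '.') :
    pvHasCC (some a) t = pvHasCC none t := by
  cases t <;> simp [pvHasCC, ha]

-- appending one char to the scanned region
lemma pv_hcc_append (c : Char) : ∀ (xs : List Char) (prev : Option Char),
    pvHasCC prev (xs ++ [c]) =
      (pvHasCC prev xs || ((xs.getLast?.or prev) == some '.' && c == '.')) := by
  intro xs
  induction xs with
  | nil => intro prev; simp [pvHasCC]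
  | cons x t ih =>
    intro prev
    have hl : ((x :: t).getLast?.or prev) = (t.getLast?.or (some x)) := by
      cases t with
      | nil => simp
      | cons y u =>
        rw [List.getLast?_cons_cons]
        cases h : (y :: u).getLast? with
        | none => simp [List.getLast?_eq_none_iff] at h
        | some z => rfl
    simp only [List.cons_append, pvHasCC, ih (some x), hl, Bool.or_assoc]

def pvHasDD (p : List Char) : Bool := PySem.Chars.isIn ("..".toList) p

lemma pv_hasDD_iff (p : List Char) : pvHasDD p = true ↔ ['.', '.'] <:+: p := by
  rw [pvHasDD, PySem.Chars.isIn_iff_infix,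
    show (".." : String).toList = ['.', '.'] from rfl]

lemma pv_prefix_dd (c : Char) (t : List Char) :
    (['.', '.'] <+: c :: t) ↔ (c = '.' ∧ t.head? = some '.') := by
  cases t <;> simp [List.cons_prefix_cons, eq_comm]

lemma pv_hcc_iff : ∀ (cs : List Char) (prev : Option Char),
    pvHasCC prev cs = true ↔ ((prev = some '.' ∧ cs.head? = some '.') ∨ ['.', '.'] <:+: cs) := by
  intro cs
  induction cs with
  | nil => intro prev; simp [pvHasCC]
  | cons c t ih =>
    intro prev
    simp only [pvHasCC, Bool.or_eq_true, Bool.and_eq_true, beq_iff_eq, ih,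
      List.infix_cons_iff, pv_prefix_dd, List.head?_cons, Option.some.injEq]

lemma pv_hasDD_eq_hcc (p : List Char) : pvHasDD p = pvHasCC none p := by
  apply Bool.eq_iff_iff.mpr
  rw [pv_hasDD_iff, pv_hcc_iff]
  simp

-- some piece contains ".." iff the original string has two consecutive dots
lemma pv_split_any_dd : ∀ (l cur : List Char),
    (pvSplitAt l cur).any pvHasDD = (pvHasDD cur.reverse || pvHasCC cur.head? l) := by
  intro l
  induction l with
  | nil => intro cur; simp [pvSplitAt, pvHasCC]
  | cons c t ih =>
    intro cur
    by_cases hc : c = '@'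
    · have h1 : pvHasCC (some '@') t = pvHasCC none t := pv_hcc_irrel t '@' (by decide)
      have h2 : pvHasDD ([] : List Char) = false := by decide
      simp [pvSplitAt, hc, ih, pvHasCC, h1, h2]
    · have h3 : pvHasDD ((c :: cur).reverse) =
          (pvHasDD cur.reverse || ((cur.reverse.getLast?.or none) == some '.' && c == '.')) := by
        rw [show (c :: cur).reverse = cur.reverse ++ [c] from by simp]
        rw [pv_hasDD_eq_hcc, pv_hasDD_eq_hcc, pv_hcc_append]
      have h4 : cur.reverse.getLast?.or none = cur.head? := by
        cases cur <;> simp [List.getLast?_reverse]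
      simp only [pvSplitAt, if_neg hc, ih, List.head?_cons, h3, h4, pvHasCC, Bool.or_assoc]

-- A's loop computes: no consecutive dots AND exactly one '@'
lemma pv_loop_eq : ∀ (cs : List Char) (prev : Option Char) (a : Int),
    pvLoopA prev a cs = (!pvHasCC prev cs && (a + (cs.count '@' : Int) == 1)) := by
  intro cs
  induction cs with
  | nil => intro prev a; simp [pvLoopA, pvHasCC]
  | cons c t ih =>
    intro prev a
    by_cases h : (prev == some '.' && c == '.') = true
    · simp [pvLoopA, pvHasCC, h]
    · rw [Bool.not_eq_true] at h
      by_cases hc : c = '@'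
      · subst hc
        have harith : a + 1 + (t.count '@' : Int) = a + (((t.count '@') + 1 : Nat) : Int) := by
          push_cast; ring
        simp [pvLoopA, pvHasCC, ih, List.count_cons_self, harith]
      · have hcount : (c :: t).count '@' = t.count '@' := by simp [hc]
        simp [pvLoopA, pvHasCC, h, hc, ih, hcount]

-- ===== VERDICT (by name: the statement is the Claim_ definition above) =====
theorem validar_usuario_spec : Claim_equal_validar_usuario := by
  intro usuario _ hpre
  unfold Spec_validar_usuario
  obtain ⟨c, t, hct⟩ : ∃ c t, usuario.toList = c :: t := by
    cases h : usuario.toList with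
    | nil => exact absurd (by simpa using h) hpre
    | cons c t => exact ⟨c, t, rfl⟩
  have h0 : PySem.Str.pyGet? usuario 0 = some c := by
    simp [PySem.Str.pyGet?_eq, hct]
  obtain ⟨cl, hcl⟩ : ∃ cl, (c :: t).getLast? = some cl :=
    ⟨(c :: t).getLast (by simp), List.getLast?_eq_some_getLast (by simp)⟩
  have h1 : PySem.Str.pyGet? usuario (-1) = some cl := by
    simp [PySem.Str.pyGet?_eq, hct, PySem.List.pyGet?_neg_one, hcl]
  unfold validar_usuario validar_usuario_alt
  rw [h0, h1]
  simp only [Option.bind_some, Option.getD_some]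
  by_cases hd : (c == '.' || cl == '.') = true
  · simp [hd]
  · rw [Bool.not_eq_true] at hd
    by_cases ha : (c == '@' || cl == '@') = true
    · simp [hd, ha]
    · rw [Bool.not_eq_true] at ha
      simp only [Bool.or_eq_false_iff] at hd ha
      obtain ⟨hd1, hd2⟩ := hd
      obtain ⟨ha1, ha2⟩ := ha
      simp only [hd1, hd2, ha1, ha2, Bool.or_self, Bool.false_eq_true, if_false]
      rw [hct, pv_loop_eq]
      rw [show ("@" : String).toList = ['@'] from rfl, pv_splitOn_eq]
      have e1 : ((pvSplitAt (c :: t) []).length == 2) = (0 + (((c :: t).count '@' : Nat) : Int) == 1) := by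
        rw [pv_split_length]
        apply Bool.eq_iff_iff.mpr
        simp only [beq_iff_eq]
        omega
      have e2 : (pvSplitAt (c :: t) []).all (fun p => !(PySem.Chars.isIn ("..".toList) p)) =
          !pvHasCC none (c :: t) := by
        have h := pv_split_any_dd (c :: t) []
        simp only [List.reverse_nil, List.head?_nil] at h
        rw [show pvHasDD ([] : List Char) = false from rfl, Bool.false_or] at h
        rw [List.all_eq_not_any_not]
        simp only [Bool.not_not]
        rw [show (fun p => PySem.Chars.isIn ((".." : String).toList) p) = pvHasDD from rfl, h]
      rw [e1, e2, Bool.and_comm]
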